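-- pv_equiv track=rewrite | github.com/the-omega-institute/automath | theory/2026_golden_ratio_driven_scan_projection_generation_recursive_emergence/scripts/common_window6_audit.py | ledger_prefix_integers
-- ===== SOURCE A (Python) =====
-- from typing import Dict, List, Mapping, Sequence, Tuple
--
-- EVENT_CODES_6: Mapping[str, int] = {
--     "stay": 1,
--     "refine": 2,
--     "flip_100001": 3,
--     "flip_100101": 4,
--     "flip_101001": 5,
--     "decode": 6,
-- }
--
-- def first_primes(count: int) -> List[int]:
--     if count < 0:
--         raise ValueError("count must be non-negative")
--     out: List[int] = []
--     x = 2
--     while len(out) < count: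
--         is_prime = True
--         r = int(x**0.5)
--         for p in out:
--             if p > r:
--                 break
--             if x % p == 0:
--                 is_prime = False
--                 break
--         if is_prime:
--             out.append(x)
--         x += 1
--     return out
--
-- def ledger_prefix_integers(events: Sequence[str], codes: Mapping[str, int] | None = None) -> List[int]:
--     code_map = dict(codes or EVENT_CODES_6)
--     ps = first_primes(len(events))
--     out: List[int] = []
--     current = 1
--     for p, evt in zip(ps, events, strict=True):
--         current *= p ** int(code_map[evt])
--         out.append(int(current))
--     return out
-- ===== SOURCE B (Python) =====
-- from typing import Dict, List, Mapping, Sequence, Tuple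
--
-- EVENT_CODES_6: Mapping[str, int] = {
--     "stay": 1,
--     "refine": 2,
--     "flip_100001": 3,
--     "flip_100101": 4,
--     "flip_101001": 5,
--     "decode": 6,
-- }
--
-- def _sieve_primes(limit: int) -> List[int]:
--     """All primes <= limit via a sieve (mark every proper multiple of every i)."""
--     comp = [False] * (limit + 1)
--     for i in range(2, limit + 1):
--         for j in range(2 * i, limit + 1, i):
--             comp[j] = True
--     return [i for i in range(2, limit + 1) if not comp[i]]
--
-- def ledger_prefix_integers(events: Sequence[str], codes: Mapping[str, int] | None = None) -> List[int]:
--     code_map = dict(codes or EVENT_CODES_6)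
--     n = len(events)
--     limit = 2 * n + 10
--     primes = _sieve_primes(limit)
--     while len(primes) < n:
--         limit *= 2
--         primes = _sieve_primes(limit)
--     primes = primes[:n]
--     exps = [int(code_map[e]) for e in events]
--     factors = [p ** c for p, c in zip(primes, exps)]
--     out: List[int] = []
--     current = 1
--     for f in factors:
--         current *= f
--         out.append(current)
--     return out
-- ===== Notes on version B (the rewrite author's own statement) =====
-- stated objective: alternative
-- what changed: Prime generation is replaced: A builds primes one by one with trial division by the primes found so far (up to int(sqrt(x))), B sieves an array up to a doubled-on-demand limit and slices the first n primes; B also precomputes the exponent and factor lists before the single prefix-product pass.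
-- outside the precondition, e.g. on ledger_prefix_integers(['stay'], {'stay': -1}): A returns [0], B returns [0.5]
import Mathlib
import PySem

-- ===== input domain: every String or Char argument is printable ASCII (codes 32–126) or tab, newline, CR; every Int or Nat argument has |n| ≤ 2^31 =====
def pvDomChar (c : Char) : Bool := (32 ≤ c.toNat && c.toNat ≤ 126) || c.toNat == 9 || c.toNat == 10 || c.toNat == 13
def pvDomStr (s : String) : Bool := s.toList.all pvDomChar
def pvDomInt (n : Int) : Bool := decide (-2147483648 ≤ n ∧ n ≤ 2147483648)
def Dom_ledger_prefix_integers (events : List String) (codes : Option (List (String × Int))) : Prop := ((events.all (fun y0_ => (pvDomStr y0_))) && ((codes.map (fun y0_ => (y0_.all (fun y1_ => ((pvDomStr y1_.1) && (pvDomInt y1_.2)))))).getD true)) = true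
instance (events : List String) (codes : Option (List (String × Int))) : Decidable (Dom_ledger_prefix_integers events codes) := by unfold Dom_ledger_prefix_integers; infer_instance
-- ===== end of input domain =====

-- B replaces A's incremental trial-division prime generation by a sieve up to a doubled-on-demand
-- limit (and precomputes the factor list before the prefix-product pass); same return value.


-- ===== PORT A =====
-- inner 'for p in out: if p > r: break; if x % p == 0: is_prime = False; break'
def pvFPcheck (x r : Nat) : List Nat → Bool
  | [] => true
  | p :: ps => if r < p then true else if x % p = 0 then false else pvFPcheck x r ps

-- 'while len(out) < count: …; x += 1' — fuel-guarded only to be total; fuel 2^(count+1)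
-- is proved sufficient below (pvFPloop_correct / pvCount_two_pow), so behaviour matches Python.
-- int(x**0.5) is ported as Nat.sqrt x (hand port of the float expression; exact for x < 2^52).
def pvFPloop (count : Nat) : Nat → Nat → List Nat → List Nat
  | 0, _, out => out
  | fuel + 1, x, out =>
    if out.length < count then
      pvFPloop count fuel (x + 1) (if pvFPcheck x (Nat.sqrt x) out then out ++ [x] else out)
    else out

def pvFirstPrimes (count : Nat) : List Nat := pvFPloop count (2 ^ (count + 1)) 2 []

def ledger_prefix_integers (events : List String) (codes : Option (List (String × Int))) : List Int :=
  -- code_map = dict(codes or EVENT_CODES_6): None and the empty dict both fall back to the default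
  let cs := codes.getD []
  let code_map := PySem.Dict.ofList (if cs.isEmpty then [("stay", 1), ("refine", 2), ("flip_100001", 3), ("flip_100101", 4), ("flip_101001", 5), ("decode", 6)] else cs)
  let ps := pvFirstPrimes events.length
  -- 'for p, evt in zip(ps, events, strict=True): current *= p ** int(code_map[evt]); out.append(int(current))'
  -- code_map[evt] (KeyError) and negative codes (float power) are excluded by Pre_, so getD 0 / toNat are exact there
  (List.foldl
    (fun (st : Int × List Int) pe =>
      let cur := st.1 * ((pe.1 : Int)) ^ ((code_map.get? pe.2).getD 0).toNat
      (cur, st.2 ++ [cur]))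
    (1, []) (ps.zip events)).2

-- ===== PORT B =====
-- _sieve_primes(limit): comp = [False]*(limit+1); for i in range(2, limit+1): for j in range(2*i, limit+1, i): comp[j] = True
def pvSieve (limit : Nat) : List Nat :=
  let comp := (List.range' 2 (limit - 1)).foldl
    (fun (c : List Bool) (i : Nat) =>
      (PySem.List.pyRange (2 * (i : Int)) ((limit : Int) + 1) (i : Int)).foldl
        (fun c2 j => c2.set j.toNat true) c)
    (List.replicate (limit + 1) false)
  (List.range' 2 (limit - 1)).filter (fun i => !(comp.getD i false))

-- 'while len(primes) < n: limit *= 2; primes = _sieve_primes(limit)' — fuel-guarded only to be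
-- total; fuel n+1 is proved sufficient below (pvGrow_correct), so behaviour matches Python.
def pvGrow (n : Nat) : Nat → Nat → List Nat
  | 0, limit => pvSieve limit
  | fuel + 1, limit =>
    let ps := pvSieve limit
    if ps.length < n then pvGrow n fuel (2 * limit) else ps

def ledger_prefix_integers_alt (events : List String) (codes : Option (List (String × Int))) : List Int :=
  -- code_map = dict(codes or EVENT_CODES_6)
  let cs := codes.getD []
  let code_map := PySem.Dict.ofList (if cs.isEmpty then [("stay", 1), ("refine", 2), ("flip_100001", 3), ("flip_100101", 4), ("flip_101001", 5), ("decode", 6)] else cs)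
  let n := events.length
  let primes := (pvGrow n (n + 1) (2 * n + 10)).take n        -- primes[:n] after the grow loop
  let exps := events.map (fun e => (code_map.get? e).getD 0)  -- KeyError excluded by Pre_
  let factors := (primes.zip exps).map (fun pc => ((pc.1 : Int)) ^ pc.2.toNat)
  (List.foldl (fun (st : Int × List Int) f => (st.1 * f, st.2 ++ [st.1 * f])) (1, []) factors).2

-- ===== PRECONDITION & SPEC =====
-- Pre_ excludes (a) events missing from the effective code map, where A raises KeyError, and
-- (b) events whose code is negative, where 'p ** code' is a float: A returns rounding artefacts
-- (int(current) of a float) and B returns floats — neither value is portable as an exact Int.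
def Pre_ledger_prefix_integers (events : List String) (codes : Option (List (String × Int))) : Prop :=
  ∀ e ∈ events,
    0 ≤ (PySem.Dict.ofList
      (if (codes.getD []).isEmpty then [("stay", 1), ("refine", 2), ("flip_100001", 3), ("flip_100101", 4), ("flip_101001", 5), ("decode", 6)] else codes.getD [])).getD e (-1)
instance (events : List String) (codes : Option (List (String × Int))) : Decidable (Pre_ledger_prefix_integers events codes) := by unfold Pre_ledger_prefix_integers; infer_instance

def pvWitness_ledger_prefix_integers : List String × (Option (List (String × Int))) :=
  (["stay", "decode", "refine"], none)

def Spec_ledger_prefix_integers (events : List String) (codes : Option (List (String × Int))) (out : List Int) : Prop := out = ledger_prefix_integers_alt events codes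
instance (events : List String) (codes : Option (List (String × Int))) (out : List Int) : Decidable (Spec_ledger_prefix_integers events codes out) := by unfold Spec_ledger_prefix_integers; infer_instance

-- ===== CLAIM (what is proved, stated in full; the proofs are below) =====
def Claim_equal_ledger_prefix_integers : Prop := ∀ (events : List String) (codes : Option (List (String × Int))), Dom_ledger_prefix_integers events codes → Pre_ledger_prefix_integers events codes → Spec_ledger_prefix_integers events codes (ledger_prefix_integers events codes)

-- ===== LEMMAS AND PROOFS =====

def pvPrimesBelow (m : Nat) : List Nat := (List.range m).filter (fun k => decide (Nat.Prime k))

theorem pvPrimesBelow_prefix {a b : Nat} (h : a ≤ b) : pvPrimesBelow a <+: pvPrimesBelow b := by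
  unfold pvPrimesBelow
  have : b = a + (b - a) := by omega
  rw [this, List.range_add, List.filter_append]
  exact ⟨_, rfl⟩

theorem pvTake_eq_of_prefix {l₁ l₂ : List Nat} {n : Nat} (h : l₁ <+: l₂) (hn : n ≤ l₁.length) :
    l₁.take n = l₂.take n := by
  obtain ⟨t, rfl⟩ := h
  rw [List.take_append_of_le_length hn]

theorem pvCount_mono {a b : Nat} (h : a ≤ b) :
    (pvPrimesBelow a).length ≤ (pvPrimesBelow b).length :=
  (pvPrimesBelow_prefix h).sublist.length_le

theorem pvCount_two_pow (n : Nat) : n ≤ (pvPrimesBelow (2 ^ (n + 1))).length := by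
  induction n with
  | zero => exact Nat.zero_le _
  | succ n ih =>
    obtain ⟨p, hp, hlt, hle⟩ := Nat.exists_prime_lt_and_le_two_mul (2 ^ (n + 1)) (by positivity)
    have hplt : p < 2 ^ (n + 2) := by
      rcases Nat.lt_or_ge p (2 ^ (n + 2)) with h | h
      · exact h
      · exfalso
        have : p = 2 ^ (n + 2) := by
          have : 2 * 2 ^ (n + 1) = 2 ^ (n + 2) := by ring
          omega
        subst this
        have h2 : (2 : Nat) ∣ 2 ^ (n + 2) := dvd_pow_self 2 (by omega)
        have h4 : 2 ^ 2 ≤ 2 ^ (n + 2) := Nat.pow_le_pow_right (by norm_num) (by omega)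
        rcases (Nat.Prime.eq_one_or_self_of_dvd hp 2 h2) with h' | h' <;> omega
    have hsplit : pvPrimesBelow (2 ^ (n + 2)) =
        pvPrimesBelow (2 ^ (n + 1)) ++
          (List.filter (fun k => decide (Nat.Prime k))
            ((List.range (2 ^ (n + 1))).map (fun x => 2 ^ (n + 1) + x))) := by
      unfold pvPrimesBelow
      have : 2 ^ (n + 2) = 2 ^ (n + 1) + 2 ^ (n + 1) := by ring
      rw [this, List.range_add, List.filter_append]
    have he : 2 ^ (n + 2) = 2 * 2 ^ (n + 1) := by ring
    have hmem : p ∈ List.filter (fun k => decide (Nat.Prime k))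
        ((List.range (2 ^ (n + 1))).map (fun x => 2 ^ (n + 1) + x)) := by
      rw [List.mem_filter]
      constructor
      · rw [List.mem_map]
        exact ⟨p - 2 ^ (n + 1), by rw [List.mem_range]; omega, by omega⟩
      · simpa using hp
    have hpos : 0 < (List.filter (fun k => decide (Nat.Prime k))
        ((List.range (2 ^ (n + 1))).map (fun x => 2 ^ (n + 1) + x))).length :=
      List.length_pos_of_mem hmem
    rw [hsplit, List.length_append]
    exact Nat.add_le_add ih hpos

theorem pvMem_primesBelow {p m : Nat} : p ∈ pvPrimesBelow m ↔ p < m ∧ Nat.Prime p := by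
  unfold pvPrimesBelow
  simp [List.mem_filter, List.mem_range]

theorem pvFPcheck_iff (x r : Nat) :
    ∀ l : List Nat, l.Pairwise (· < ·) →
      (pvFPcheck x r l = true ↔ ∀ p ∈ l, p ≤ r → ¬(x % p = 0)) := by
  intro l
  induction l with
  | nil => simp [pvFPcheck]
  | cons p ps ih =>
    intro hpw
    have hpw' := (List.pairwise_cons.mp hpw)
    rw [pvFPcheck]
    split_ifs with h1 h2
    · simp only [true_iff]
      intro q hq hqr
      rcases hq with _ | hq
      · omega
      · have := hpw'.1 q (by assumption); omega
    · simp only [false_iff]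
      exact fun hall => hall p (List.mem_cons_self ..) (by omega) h2
    · rw [ih hpw'.2]
      constructor
      · intro h q hq hqr
        rcases List.mem_cons.mp hq with rfl | hq'
        · exact fun hc => h2 hc
        · exact h q hq' hqr
      · intro h q hq hqr
        exact h q (List.mem_cons_of_mem _ hq) hqr

theorem pvPairwise_primesBelow (m : Nat) : (pvPrimesBelow m).Pairwise (· < ·) :=
  List.Pairwise.sublist List.filter_sublist List.pairwise_lt_range

theorem pvFPcheck_correct {x : Nat} (hx : 2 ≤ x) :
    pvFPcheck x (Nat.sqrt x) (pvPrimesBelow x) = decide (Nat.Prime x) := by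
  rcases h : decide (Nat.Prime x) with _ | _
  · -- not prime: check must be false
    have hnp : ¬ Nat.Prime x := of_decide_eq_false h
    rw [← Bool.not_eq_true]
    rw [pvFPcheck_iff x (Nat.sqrt x) _ (pvPairwise_primesBelow x)]
    intro hall
    refine hall x.minFac ?_ ?_ (Nat.mod_eq_zero_of_dvd (Nat.minFac_dvd x))
    · rw [pvMem_primesBelow]
      have hpr := Nat.minFac_prime (by omega : x ≠ 1)
      have hsq := Nat.minFac_sq_le_self (by omega) hnp
      have hle : x.minFac ≤ Nat.sqrt x := Nat.le_sqrt'.mpr hsq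
      have := Nat.sqrt_lt_self (by omega : 1 < x)
      exact ⟨by omega, hpr⟩
    · have hsq := Nat.minFac_sq_le_self (by omega) hnp
      exact Nat.le_sqrt'.mpr hsq
  · -- prime: check must be true
    have hp : Nat.Prime x := of_decide_eq_true h
    rw [pvFPcheck_iff x (Nat.sqrt x) _ (pvPairwise_primesBelow x)]
    intro p hpmem hpr hmod
    rw [pvMem_primesBelow] at hpmem
    have hdvd : p ∣ x := Nat.dvd_of_mod_eq_zero hmod
    rcases (Nat.Prime.eq_one_or_self_of_dvd hp p hdvd) with h' | h'
    · exact Nat.Prime.one_lt hpmem.2 |>.ne' (by omega)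
    · omega

theorem pvPrimesBelow_succ (x : Nat) :
    pvPrimesBelow (x + 1) =
      pvPrimesBelow x ++ (if Nat.Prime x then [x] else []) := by
  unfold pvPrimesBelow
  rw [List.range_succ, List.filter_append]
  congr 1
  rcases h : decide (Nat.Prime x) with _ | _ <;> simp_all [List.filter]

theorem pvFPloop_correct (count : Nat) :
    ∀ (fuel x : Nat) (out : List Nat), 2 ≤ x → out = pvPrimesBelow x → out.length ≤ count →
      count ≤ (pvPrimesBelow (x + fuel)).length →
      pvFPloop count fuel x out = (pvPrimesBelow (x + fuel)).take count := by
  intro fuel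
  induction fuel with
  | zero =>
    intro x out hx hout hlen hcnt
    rw [pvFPloop]
    rw [Nat.add_zero] at hcnt ⊢
    have hceq : out.length = count := by rw [hout] at hlen ⊢; omega
    rw [← hout, ← hceq, List.take_length]
  | succ fuel ih =>
    intro x out hx hout hlen hcnt
    rw [pvFPloop]
    by_cases hl : out.length < count
    · rw [if_pos hl]
      have hstep : (if pvFPcheck x (Nat.sqrt x) out then out ++ [x] else out) =
          pvPrimesBelow (x + 1) := by
        rw [hout, pvFPcheck_correct hx, pvPrimesBelow_succ]
        rcases h : decide (Nat.Prime x) with _ | _ <;> simp_all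
      rw [hstep]
      have harith : x + 1 + fuel = x + (fuel + 1) := by omega
      have hlen' : (pvPrimesBelow (x + 1)).length ≤ count := by
        rw [pvPrimesBelow_succ, List.length_append]
        rw [hout] at hl
        split_ifs <;> simp <;> omega
      rw [ih (x + 1) _ (by omega) rfl hlen' (by rw [harith]; exact hcnt), harith]
    · rw [if_neg hl]
      have hceq : out.length = count := by omega
      calc out = (pvPrimesBelow x).take count := by rw [← hceq, hout, List.take_length]
        _ = (pvPrimesBelow (x + (fuel + 1))).take count :=
          pvTake_eq_of_prefix (pvPrimesBelow_prefix (by omega))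
            (by rw [hout] at hceq; omega)

theorem pvFirstPrimes_eq (count : Nat) :
    pvFirstPrimes count = (pvPrimesBelow (2 + 2 ^ (count + 1))).take count := by
  unfold pvFirstPrimes
  refine pvFPloop_correct count (2 ^ (count + 1)) 2 [] (by omega) (by decide) (by simp) ?_
  calc count ≤ (pvPrimesBelow (2 ^ (count + 1))).length := pvCount_two_pow count
    _ ≤ _ := pvCount_mono (by omega)

theorem pvSetFold_length (L : List Int) (c : List Bool) :
    (L.foldl (fun c2 j => c2.set j.toNat true) c).length = c.length := by
  induction L generalizing c with
  | nil => rfl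
  | cons j L ih => rw [List.foldl_cons, ih, List.length_set]

theorem pvSetFold_getD (L : List Int) (c : List Bool) (k : Nat) :
    (L.foldl (fun c2 j => c2.set j.toNat true) c).getD k false
      = (c.getD k false || (decide (k < c.length) && L.any (fun j => decide (j.toNat = k)))) := by
  induction L generalizing c with
  | nil => simp
  | cons j L ih =>
    rw [List.foldl_cons, ih, List.length_set]
    have hset : (c.set j.toNat true).getD k false
        = (c.getD k false || (decide (k < c.length) && decide (j.toNat = k))) := by
      rw [List.getD_eq_getElem?_getD, List.getD_eq_getElem?_getD, List.getElem?_set]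
      by_cases h1 : j.toNat = k <;> by_cases h2 : k < c.length <;>
        simp [h1, h2]
    rw [hset]
    cases c.getD k false <;> by_cases h2 : k < c.length <;> simp [h2]

theorem pvOuterFold_getD (I : List Nat) (limit : Nat) (hI : ∀ i ∈ I, 2 ≤ i)
    (c : List Bool) (k : Nat) (hk : k < c.length) :
    (I.foldl (fun (c : List Bool) (i : Nat) =>
      (PySem.List.pyRange (2 * (i : Int)) ((limit : Int) + 1) (i : Int)).foldl
        (fun c2 j => c2.set j.toNat true) c) c).getD k false
      = (c.getD k false || I.any (fun i => decide (i ∣ k ∧ 2 * i ≤ k ∧ k ≤ limit))) := by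
  induction I generalizing c with
  | nil => simp
  | cons i I ih =>
    have hi : 2 ≤ i := hI i (List.mem_cons_self ..)
    rw [List.foldl_cons, ih (fun q hq => hI q (List.mem_cons_of_mem _ hq)) _
      (by rw [pvSetFold_length]; exact hk)]
    rw [pvSetFold_getD]
    have hmem : (L : List Int) → (L = PySem.List.pyRange (2 * (i : Int)) ((limit : Int) + 1) (i : Int)) →
        L.any (fun j => decide (j.toNat = k)) = decide (i ∣ k ∧ 2 * i ≤ k ∧ k ≤ limit) := by
      intro L hL
      rcases h : decide (i ∣ k ∧ 2 * i ≤ k ∧ k ≤ limit) with _ | _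
      · have hnot := of_decide_eq_false h
        apply List.any_eq_false.mpr
        intro j hj
        simp only [decide_eq_true_eq]
        intro hjk
        rw [hL, PySem.List.mem_pyRange_iff_of_pos (by exact_mod_cast Nat.lt_of_lt_of_le Nat.zero_lt_two hi)] at hj
        obtain ⟨h1, h2, h3⟩ := hj
        have hj0 : 0 ≤ j := le_trans (by positivity) h1
        have hjk' : j = (k : Int) := by omega
        subst hjk'
        have hdvd : (i : Int) ∣ (k : Int) := by
          have : (i : Int) ∣ 2 * i := ⟨2, by ring⟩
          have := dvd_add h3 this
          simpa using this
        exact hnot ⟨by exact_mod_cast hdvd, by omega, by omega⟩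
      · have ⟨hdvd, h2, h3⟩ := of_decide_eq_true h
        apply List.any_eq_true.mpr
        refine ⟨(k : Int), ?_, by simp⟩
        rw [hL, PySem.List.mem_pyRange_iff_of_pos (by exact_mod_cast Nat.lt_of_lt_of_le Nat.zero_lt_two hi)]
        refine ⟨by exact_mod_cast h2, by exact_mod_cast Nat.lt_succ_of_le h3, ?_⟩
        have : (i : Int) ∣ (k : Int) := by exact_mod_cast hdvd
        exact dvd_sub this ⟨2, by ring⟩
    rw [hmem _ rfl, decide_eq_true hk]
    cases c.getD k false <;> simp

theorem pvNoProperDiv_iff_prime {k : Nat} (hk : 2 ≤ k) :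
    (¬ ∃ d, 2 ≤ d ∧ d ∣ k ∧ 2 * d ≤ k) ↔ Nat.Prime k := by
  constructor
  · intro hno
    by_contra hnp
    apply hno
    refine ⟨k.minFac, (Nat.minFac_prime (by omega : k ≠ 1)).two_le, Nat.minFac_dvd k, ?_⟩
    obtain ⟨c, hc⟩ := Nat.minFac_dvd k
    have hc0 : c ≠ 0 := by rintro rfl; omega
    have hc1 : c ≠ 1 := by
      rintro rfl
      rw [Nat.mul_one] at hc
      exact hnp (hc ▸ Nat.minFac_prime (by omega : k ≠ 1))
    calc 2 * k.minFac = k.minFac * 2 := by ring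
      _ ≤ k.minFac * c := Nat.mul_le_mul_left _ (by omega)
      _ = k := hc.symm
  · rintro hp ⟨d, hd2, hdvd, hdle⟩
    rcases (Nat.Prime.eq_one_or_self_of_dvd hp d hdvd) with h' | h' <;> omega

theorem pvSieve_eq {limit : Nat} (h : 2 ≤ limit) : pvSieve limit = pvPrimesBelow (limit + 1) := by
  unfold pvSieve
  have hfilter : ∀ i ∈ List.range' 2 (limit - 1),
      (!(((List.range' 2 (limit - 1)).foldl
        (fun (c : List Bool) (i : Nat) =>
          (PySem.List.pyRange (2 * (i : Int)) ((limit : Int) + 1) (i : Int)).foldl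
            (fun c2 j => c2.set j.toNat true) c)
        (List.replicate (limit + 1) false)).getD i false))
        = decide (Nat.Prime i) := by
    intro i hi
    rw [List.mem_range'_1] at hi
    have hilt : i < limit + 1 := by omega
    rw [pvOuterFold_getD _ limit (fun q hq => (List.mem_range'_1.mp hq).1) _ i
      (by rw [List.length_replicate]; exact hilt)]
    rw [List.getD_eq_getElem?_getD]
    simp only [List.getElem?_replicate, hilt, if_pos, Bool.false_or, Option.getD_some]
    rcases hany : (List.range' 2 (limit - 1)).any
        (fun d => decide (d ∣ i ∧ 2 * d ≤ i ∧ i ≤ limit)) with _ | _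
    · rw [List.any_eq_false] at hany
      simp only [Bool.not_false, true_eq_decide_iff]
      rw [← pvNoProperDiv_iff_prime (by omega)]
      rintro ⟨d, hd2, hdvd, hdle⟩
      have hdle' : d ≤ i := Nat.le_of_dvd (by omega) hdvd
      have hmem' := hany d (List.mem_range'_1.mpr ⟨hd2, by omega⟩)
      exact hmem' (decide_eq_true ⟨hdvd, hdle, by omega⟩)
    · rw [List.any_eq_true] at hany
      obtain ⟨d, hdmem, hd⟩ := hany
      have hd' := of_decide_eq_true hd
      simp only [Bool.not_true, false_eq_decide_iff]
      rw [← pvNoProperDiv_iff_prime (by omega), not_not]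
      exact ⟨d, (List.mem_range'_1.mp hdmem).1, hd'.1, hd'.2.1⟩
  rw [List.filter_congr hfilter]
  unfold pvPrimesBelow
  have hsplit : limit + 1 = 2 + (limit - 1) := by omega
  rw [hsplit, List.range_add, List.filter_append]
  rw [show List.map (fun x => 2 + x) (List.range (limit - 1)) = List.range' 2 (limit - 1) from
    List.range'_eq_map_range.symm]
  rfl

theorem pvGrow_correct (n : Nat) :
    ∀ (fuel limit : Nat), 2 ≤ limit → n ≤ (pvPrimesBelow (limit * 2 ^ fuel + 1)).length →
      ∃ L, pvGrow n fuel limit = pvPrimesBelow L ∧ n ≤ (pvPrimesBelow L).length := by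
  intro fuel
  induction fuel with
  | zero =>
    intro limit h2 hn
    rw [Nat.pow_zero, Nat.mul_one] at hn
    exact ⟨limit + 1, by rw [pvGrow, pvSieve_eq h2], hn⟩
  | succ fuel ih =>
    intro limit h2 hn
    rw [pvGrow]
    by_cases hlt : (pvSieve limit).length < n
    · simp only [if_pos hlt]
      apply ih (2 * limit) (by omega)
      have harith : 2 * limit * 2 ^ fuel = limit * 2 ^ (fuel + 1) := by ring
      rw [harith]
      exact hn
    · simp only [if_neg hlt]
      refine ⟨limit + 1, pvSieve_eq h2, ?_⟩
      rw [← pvSieve_eq h2]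
      omega

theorem pvPrimes_agree (n : Nat) :
    pvFirstPrimes n = (pvGrow n (n + 1) (2 * n + 10)).take n := by
  have hbound : n ≤ (pvPrimesBelow ((2 * n + 10) * 2 ^ (n + 1) + 1)).length := by
    refine le_trans (pvCount_two_pow n) (pvCount_mono ?_)
    calc 2 ^ (n + 1) = 1 * 2 ^ (n + 1) := by ring
      _ ≤ (2 * n + 10) * 2 ^ (n + 1) := Nat.mul_le_mul_right _ (by omega)
      _ ≤ _ := Nat.le_succ _
  obtain ⟨L, hL, hn⟩ := pvGrow_correct n (n + 1) (2 * n + 10) (by omega) hbound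
  rw [pvFirstPrimes_eq, hL]
  have hcnt : n ≤ (pvPrimesBelow (2 + 2 ^ (n + 1))).length :=
    le_trans (pvCount_two_pow n) (pvCount_mono (by omega))
  rcases le_total (2 + 2 ^ (n + 1)) L with h | h
  · exact pvTake_eq_of_prefix (pvPrimesBelow_prefix h) hcnt
  · exact (pvTake_eq_of_prefix (pvPrimesBelow_prefix h) hn).symm

-- ===== VERDICT (by name: the statement is the Claim_ definition above) =====
theorem ledger_prefix_integers_spec : Claim_equal_ledger_prefix_integers := by
  intro events codes _ _
  unfold Spec_ledger_prefix_integers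
  simp only [ledger_prefix_integers, ledger_prefix_integers_alt]
  rw [← pvPrimes_agree events.length, List.zip_map_right, List.map_map, List.foldl_map]
  rfl
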